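-- pv_equiv track=rewrite | github.com/bbugyi200/dotfiles | home/lib/gai/src/status_state_machine.py | _apply_parent_update
-- ===== SOURCE A (Python) =====
-- def _apply_parent_update(
--     lines: list[str], changespec_name: str, new_parent: str | None
-- ) -> str:
--     """Apply PARENT field update to file lines.
--
--     Args:
--         lines: Current file lines.
--         changespec_name: NAME of the ChangeSpec to update.
--         new_parent: New PARENT value (None to remove).
--
--     Returns:
--         Updated file content as a string.
--     """
--     updated_lines = []
--     in_target_changespec = False
--     found_parent_line = False
--     in_description = False
--
--     for line in lines:
--         # Check if this is a NAME field
--         if line.startswith("NAME:"):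
--             current_name = line.split(":", 1)[1].strip()
--             in_target_changespec = current_name == changespec_name
--             found_parent_line = False
--             in_description = False
--
--         # Track when we're in the DESCRIPTION field
--         if in_target_changespec and line.startswith("DESCRIPTION:"):
--             in_description = True
--
--         # Update PARENT if we're in the target ChangeSpec
--         if in_target_changespec and line.startswith("PARENT:"):
--             found_parent_line = True
--             # Replace the PARENT line, or skip it entirely if resetting to None
--             if new_parent is not None:
--                 updated_lines.append(f"PARENT: {new_parent}\n")
--             # When new_parent is None, we simply skip this line (don't append it)
--         elif (
--             in_target_changespec
--             and in_description
--             and (line.startswith("CL:") or line.startswith("STATUS:"))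
--             and not found_parent_line
--         ):
--             # PARENT field doesn't exist - add it before CL or STATUS if we have value
--             if new_parent is not None:
--                 updated_lines.append(f"PARENT: {new_parent}\n")
--                 found_parent_line = True
--             in_description = False
--             updated_lines.append(line)
--         else:
--             # End description section when we hit another field
--             if (
--                 in_target_changespec
--                 and in_description
--                 and line.startswith(
--                     ("PARENT:", "CL:", "STATUS:", "TEST TARGETS:", "KICKSTART:")
--                 )
--             ):
--                 in_description = False
--             updated_lines.append(line)
--
--     return "".join(updated_lines)
-- ===== SOURCE B (Python) =====
-- def _apply_parent_update(
--     lines: list[str], changespec_name: str, new_parent: str | None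
-- ) -> str:
--     """Apply PARENT field update to file lines (block-wise rewrite)."""
--
--     def edit_block(block: list[str]) -> list[str]:
--         out = [block[0]]
--         found = False
--         in_desc = False
--         for line in block[1:]:
--             if line.startswith("PARENT:"):
--                 found = True
--                 if new_parent is not None:
--                     out.append(f"PARENT: {new_parent}\n")
--             elif in_desc and not found and (
--                 line.startswith("CL:") or line.startswith("STATUS:")
--             ):
--                 if new_parent is not None:
--                     out.append(f"PARENT: {new_parent}\n")
--                     found = True
--                 in_desc = False
--                 out.append(line)
--             else:
--                 if line.startswith("DESCRIPTION:"):
--                     in_desc = True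
--                 elif in_desc and line.startswith(
--                     ("CL:", "STATUS:", "TEST TARGETS:", "KICKSTART:")
--                 ):
--                     in_desc = False
--                 out.append(line)
--         return out
--
--     # Split into a preamble plus blocks, each block starting at a NAME: line.
--     blocks = []
--     cur = []
--     for line in lines:
--         if line.startswith("NAME:"):
--             blocks.append(cur)
--             cur = [line]
--         else:
--             cur.append(line)
--     blocks.append(cur)
--
--     result = []
--     for block in blocks:
--         if (
--             block
--             and block[0].startswith("NAME:")
--             and block[0].split(":", 1)[1].strip() == changespec_name
--         ):
--             result.extend(edit_block(block))
--         else: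
--             result.extend(block)
--     return "".join(result)
-- ===== Notes on version B (the rewrite author's own statement) =====
-- stated objective: simpler
-- what changed: B splits the file into a preamble plus NAME:-headed blocks and rewrites each matching block with a self-contained two-flag edit, instead of A's single pass threading an in_target flag together with found/description state across the whole file.
import Mathlib
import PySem

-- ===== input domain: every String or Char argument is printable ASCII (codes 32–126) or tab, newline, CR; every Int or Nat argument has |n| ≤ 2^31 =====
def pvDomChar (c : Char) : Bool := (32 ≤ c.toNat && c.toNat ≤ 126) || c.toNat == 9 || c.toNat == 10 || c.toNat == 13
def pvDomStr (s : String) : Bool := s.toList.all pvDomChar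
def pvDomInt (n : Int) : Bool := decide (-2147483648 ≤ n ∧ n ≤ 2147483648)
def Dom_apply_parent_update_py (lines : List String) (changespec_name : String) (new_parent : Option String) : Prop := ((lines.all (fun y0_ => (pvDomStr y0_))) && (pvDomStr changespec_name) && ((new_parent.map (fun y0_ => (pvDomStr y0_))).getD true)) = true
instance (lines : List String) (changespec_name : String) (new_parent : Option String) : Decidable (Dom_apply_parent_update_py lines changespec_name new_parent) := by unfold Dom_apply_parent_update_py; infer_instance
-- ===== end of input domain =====

-- B rewrites the file block-by-block (split at NAME: lines) instead of A's single
-- three-flag scan; objective: simpler decomposition, same exact output.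

-- name extracted from a "NAME:…" line: line.split(":", 1)[1].strip()
-- (the [1] index always exists on lines starting with "NAME:", so getD is exact there)
def apName (line : String) : String :=
  PySem.Str.strip (((PySem.Str.splitMax? line ":" 1).getD []).getD 1 "")

-- ===== PORT A =====
-- one iteration of A's for-loop; state = (updated_lines, in_target, found_parent_line, in_description)
def apStepA (changespec_name : String) (new_parent : Option String)
    (st : List String × Bool × Bool × Bool) (line : String) :
    List String × Bool × Bool × Bool :=
  let out := st.1
  let fl :=
    if PySem.Str.startswith line "NAME:" then
      (apName line == changespec_name, false, false)
    else st.2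
  let inT := fl.1
  let found := fl.2.1
  let desc := if inT && PySem.Str.startswith line "DESCRIPTION:" then true else fl.2.2
  if inT && PySem.Str.startswith line "PARENT:" then
    (match new_parent with
     | some p => out ++ ["PARENT: " ++ p ++ "\n"]
     | none => out, inT, true, desc)
  else if inT && desc &&
      (PySem.Str.startswith line "CL:" || PySem.Str.startswith line "STATUS:") && !found then
    match new_parent with
    | some p => (out ++ ["PARENT: " ++ p ++ "\n", line], inT, true, false)
    | none => (out ++ [line], inT, found, false)
  else
    let desc' :=
      if inT && desc &&
          (PySem.Str.startswith line "PARENT:" || PySem.Str.startswith line "CL:" ||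
           PySem.Str.startswith line "STATUS:" || PySem.Str.startswith line "TEST TARGETS:" ||
           PySem.Str.startswith line "KICKSTART:") then false
      else desc
    (out ++ [line], inT, found, desc')

def apply_parent_update_py (lines : List String) (changespec_name : String) (new_parent : Option String) : String :=
  PySem.Str.join "" (lines.foldl (apStepA changespec_name new_parent) ([], false, false, false)).1

-- ===== PORT B =====
-- one iteration of B's inner edit loop; state = (out, found, in_desc)
def apEditStep (new_parent : Option String)
    (st : List String × Bool × Bool) (line : String) : List String × Bool × Bool :=
  if PySem.Str.startswith line "PARENT:" then
    (match new_parent with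
     | some p => st.1 ++ ["PARENT: " ++ p ++ "\n"]
     | none => st.1, true, st.2.2)
  else if st.2.2 && !st.2.1 &&
      (PySem.Str.startswith line "CL:" || PySem.Str.startswith line "STATUS:") then
    match new_parent with
    | some p => (st.1 ++ ["PARENT: " ++ p ++ "\n", line], true, false)
    | none => (st.1 ++ [line], st.2.1, false)
  else if PySem.Str.startswith line "DESCRIPTION:" then
    (st.1 ++ [line], st.2.1, true)
  else if st.2.2 &&
      (PySem.Str.startswith line "CL:" || PySem.Str.startswith line "STATUS:" ||
       PySem.Str.startswith line "TEST TARGETS:" || PySem.Str.startswith line "KICKSTART:") then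
    (st.1 ++ [line], st.2.1, false)
  else
    (st.1 ++ [line], st.2.1, st.2.2)

-- edit one block: rewrite it when it is a NAME: block for changespec_name, else keep verbatim
def apEditBlock (changespec_name : String) (new_parent : Option String)
    (block : List String) : List String :=
  match block with
  | [] => []
  | hd :: tl =>
    if PySem.Str.startswith hd "NAME:" && (apName hd == changespec_name) then
      hd :: (tl.foldl (apEditStep new_parent) ([], false, false)).1
    else hd :: tl

-- one iteration of B's splitter; state = (blocks, cur)
def apSplitStep (st : List (List String) × List String) (line : String) :
    List (List String) × List String :=
  if PySem.Str.startswith line "NAME:" then (st.1 ++ [st.2], [line])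
  else (st.1, st.2 ++ [line])

def apply_parent_update_py_alt (lines : List String) (changespec_name : String) (new_parent : Option String) : String :=
  let st := lines.foldl apSplitStep ([], [])
  PySem.Str.join "" ((st.1 ++ [st.2]).flatMap (apEditBlock changespec_name new_parent))

-- ===== PRECONDITION & SPEC =====
def Spec_apply_parent_update_py (lines : List String) (changespec_name : String) (new_parent : Option String) (out : String) : Prop := out = apply_parent_update_py_alt lines changespec_name new_parent
instance (lines : List String) (changespec_name : String) (new_parent : Option String) (out : String) : Decidable (Spec_apply_parent_update_py lines changespec_name new_parent out) := by unfold Spec_apply_parent_update_py; infer_instance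

-- ===== CLAIM (what is proved, stated in full; the proofs are below) =====
def Claim_equal_apply_parent_update_py : Prop := ∀ (lines : List String) (changespec_name : String) (new_parent : Option String), Dom_apply_parent_update_py lines changespec_name new_parent → Spec_apply_parent_update_py lines changespec_name new_parent (apply_parent_update_py lines changespec_name new_parent)

-- ===== LEMMAS AND PROOFS =====

-- two incomparable strings cannot both be prefixes of the same line
theorem sw_excl (l p q : List Char) (h1 : ¬ p <+: q) (h2 : ¬ q <+: p)
    (hp : PySem.Chars.startswith l p = true) : PySem.Chars.startswith l q = false := by
  rw [PySem.Chars.startswith_iff] at hp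
  by_contra hq
  rw [Bool.not_eq_false, PySem.Chars.startswith_iff] at hq
  rcases List.prefix_or_prefix_of_prefix hp hq with h | h
  · exact h1 h
  · exact h2 h

-- the edit step only appends to its accumulator; flags do not depend on it
theorem editStep_out (np : Option String) (o : List String) (f d : Bool) (l : String) :
    apEditStep np (o, f, d) l
      = (o ++ (apEditStep np ([], f, d) l).1, (apEditStep np ([], f, d) l).2) := by
  unfold apEditStep
  cases np <;> split_ifs <;> simp

-- simulation: on a non-NAME line inside the target block, A's step is B's edit step
theorem step_sim (cs : String) (np : Option String) (l : String)
    (hN : PySem.Chars.startswith l.toList "NAME:".toList = false) (out : List String) (f d : Bool) :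
    apStepA cs np (out, true, f, d) l
      = (out ++ (apEditStep np ([], f, d) l).1, true,
         (apEditStep np ([], f, d) l).2.1, (apEditStep np ([], f, d) l).2.2) := by
  unfold apStepA apEditStep
  by_cases hP : PySem.Chars.startswith l.toList "PARENT:".toList = true
  · have hD := sw_excl l.toList "PARENT:".toList "DESCRIPTION:".toList (by decide) (by decide) hP
    simp at hN hP hD
    cases np <;> simp [hN, hP, hD]
  · by_cases hD : PySem.Chars.startswith l.toList "DESCRIPTION:".toList = true
    · have h1 := sw_excl l.toList "DESCRIPTION:".toList "CL:".toList (by decide) (by decide) hD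
      have h2 := sw_excl l.toList "DESCRIPTION:".toList "STATUS:".toList (by decide) (by decide) hD
      have h3 := sw_excl l.toList "DESCRIPTION:".toList "TEST TARGETS:".toList (by decide) (by decide) hD
      have h4 := sw_excl l.toList "DESCRIPTION:".toList "KICKSTART:".toList (by decide) (by decide) hD
      simp at hN hP hD h1 h2 h3 h4
      cases np <;> simp [hN, hP, hD, h1, h2, h3, h4]
    · simp at hN hP hD
      cases np <;> cases f <;> cases d <;>
        simp [hN, hP, hD] <;>
        by_cases hC : PySem.Chars.startswith l.toList ['C', 'L', ':'] = true <;>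
        by_cases hS : PySem.Chars.startswith l.toList ['S', 'T', 'A', 'T', 'U', 'S', ':'] = true <;>
        by_cases hT : PySem.Chars.startswith l.toList ['T', 'E', 'S', 'T', ' ', 'T', 'A', 'R', 'G', 'E', 'T', 'S', ':'] = true <;>
        by_cases hK : PySem.Chars.startswith l.toList ['K', 'I', 'C', 'K', 'S', 'T', 'A', 'R', 'T', ':'] = true <;>
        simp [hC, hS, hT, hK]

-- unfolding apEditBlock on a nonempty block
theorem editBlock_cons (cs : String) (np : Option String) (hd : String) (tl : List String) :
    apEditBlock cs np (hd :: tl)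
      = if (PySem.Str.startswith hd "NAME:" && (apName hd == cs)) = true
        then hd :: (tl.foldl (apEditStep np) ([], false, false)).1
        else hd :: tl := rfl

-- folding one more line through B's edit loop
theorem fold_concat (np : Option String) (tl : List String) (l : String) :
    List.foldl (apEditStep np) ([], false, false) (tl ++ [l])
      = ((List.foldl (apEditStep np) ([], false, false) tl).1
           ++ (apEditStep np ([], (List.foldl (apEditStep np) ([], false, false) tl).2.1,
                 (List.foldl (apEditStep np) ([], false, false) tl).2.2) l).1,
         (apEditStep np ([], (List.foldl (apEditStep np) ([], false, false) tl).2.1,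
            (List.foldl (apEditStep np) ([], false, false) tl).2.2) l).2) := by
  rw [List.foldl_append]
  simp only [List.foldl_cons, List.foldl_nil]
  generalize List.foldl (apEditStep np) ([], false, false) tl = st
  obtain ⟨o, f, d⟩ := st
  exact editStep_out np o f d l

-- a block whose head is not a matching NAME: line is kept verbatim
theorem editBlock_id (cs : String) (np : Option String) (cur : List String)
    (h : ∀ hd, cur.head? = some hd →
      (PySem.Str.startswith hd "NAME:" && (apName hd == cs)) = false) :
    apEditBlock cs np cur = cur := by
  cases cur with
  | nil => rfl
  | cons hd tl =>
    have hb := h hd rfl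
    rw [editBlock_cons, if_neg (fun hc => Bool.false_ne_true (hb.symm.trans hc))]

-- invariant tying A's loop state to B's (blocks, cur) splitter state
def apINV (cs : String) (np : Option String) (blocks : List (List String))
    (cur out : List String) (inT found desc : Bool) : Prop :=
  if inT then
    ∃ hd tl, cur = hd :: tl ∧
      (PySem.Str.startswith hd "NAME:" && (apName hd == cs)) = true ∧
      out = blocks.flatMap (apEditBlock cs np) ++ hd :: (tl.foldl (apEditStep np) ([], false, false)).1 ∧
      found = (tl.foldl (apEditStep np) ([], false, false)).2.1 ∧
      desc = (tl.foldl (apEditStep np) ([], false, false)).2.2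
  else
    found = false ∧ desc = false ∧ out = blocks.flatMap (apEditBlock cs np) ++ cur ∧
      ∀ hd, cur.head? = some hd → (PySem.Str.startswith hd "NAME:" && (apName hd == cs)) = false

theorem inv_out (cs : String) (np : Option String) (blocks : List (List String))
    (cur out : List String) (inT found desc : Bool)
    (hinv : apINV cs np blocks cur out inT found desc) :
    out = (blocks ++ [cur]).flatMap (apEditBlock cs np) := by
  cases inT with
  | false =>
    unfold apINV at hinv
    obtain ⟨_, _, hout, hhead⟩ := hinv
    simp [hout, editBlock_id cs np cur hhead]
  | true =>
    unfold apINV at hinv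
    obtain ⟨hd, tl, hcur, hguard, hout, _, _⟩ := hinv
    subst hcur
    have hE : apEditBlock cs np (hd :: tl)
        = hd :: (tl.foldl (apEditStep np) ([], false, false)).1 := by
      rw [editBlock_cons, if_pos hguard]
    simp [hout, hE]

theorem main_inv (cs : String) (np : Option String) :
    ∀ (lines : List String) (blocks : List (List String)) (cur out : List String)
      (inT found desc : Bool), apINV cs np blocks cur out inT found desc →
      (lines.foldl (apStepA cs np) (out, inT, found, desc)).1
        = ((lines.foldl apSplitStep (blocks, cur)).1
            ++ [(lines.foldl apSplitStep (blocks, cur)).2]).flatMap (apEditBlock cs np) := by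
  intro lines
  induction lines with
  | nil =>
    intro blocks cur out inT found desc hinv
    simp only [List.foldl_nil]
    exact inv_out cs np blocks cur out inT found desc hinv
  | cons l rest ih =>
    intro blocks cur out inT found desc hinv
    simp only [List.foldl_cons]
    by_cases hN : PySem.Chars.startswith l.toList "NAME:".toList = true
    · have hD := sw_excl l.toList "NAME:".toList "DESCRIPTION:".toList (by decide) (by decide) hN
      have hPp := sw_excl l.toList "NAME:".toList "PARENT:".toList (by decide) (by decide) hN
      have hout := inv_out cs np blocks cur out inT found desc hinv
      have hN' := hN
      simp at hN' hD hPp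
      have hstep : apStepA cs np (out, inT, found, desc) l
          = (out ++ [l], apName l == cs, false, false) := by
        unfold apStepA; simp [hN', hD, hPp]
      have hsplit : apSplitStep (blocks, cur) l = (blocks ++ [cur], [l]) := by
        unfold apSplitStep; simp [hN']
      rw [hstep, hsplit]
      apply ih
      unfold apINV
      cases hM : (apName l == cs) with
      | true =>
        refine ⟨l, [], rfl, by simp [hN', hM], ?_, by simp, by simp⟩
        simp [hout]
      | false =>
        refine ⟨by simp, by simp, by simp [hout], ?_⟩
        intro hd hhd
        simp only [List.head?_cons, Option.some.injEq] at hhd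
        subst hhd
        simp [hM]
    · have hN' : PySem.Chars.startswith l.toList "NAME:".toList = false := by
        simpa using hN
      have hN'' := hN'
      simp at hN''
      have hsplit : apSplitStep (blocks, cur) l = (blocks, cur ++ [l]) := by
        unfold apSplitStep; simp [hN'']
      rw [hsplit]
      cases inT with
      | false =>
        unfold apINV at hinv
        obtain ⟨hf, hdsc, hout, hhead⟩ := hinv
        subst hf; subst hdsc
        have hstep : apStepA cs np (out, false, false, false) l
            = (out ++ [l], false, false, false) := by
          unfold apStepA; simp [hN'']
        rw [hstep]
        apply ih
        unfold apINV
        refine ⟨by simp, by simp, by simp [hout], ?_⟩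
        intro hd hhd
        cases cur with
        | nil =>
          simp only [List.nil_append, List.head?_cons, Option.some.injEq] at hhd
          subst hhd; simp [hN'']
        | cons c ctl =>
          simp only [List.cons_append, List.head?_cons, Option.some.injEq] at hhd
          subst hhd
          exact hhead c rfl
      | true =>
        unfold apINV at hinv
        obtain ⟨hd, tl, hcur, hguard, hout, hf, hdsc⟩ := hinv
        subst hf; subst hdsc
        rw [step_sim cs np l hN']
        apply ih
        unfold apINV
        refine ⟨hd, tl ++ [l], by simp [hcur], hguard, ?_, ?_, ?_⟩ <;>
          rw [fold_concat] <;> simp [hout]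

-- ===== VERDICT (by name: the statement is the Claim_ definition above) =====
theorem apply_parent_update_py_spec : Claim_equal_apply_parent_update_py := by
  intro lines cs np _
  unfold Spec_apply_parent_update_py apply_parent_update_py apply_parent_update_py_alt
  have h := main_inv cs np lines [] [] [] false false false
    (by unfold apINV; simp)
  simp only [h]
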